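-- pv_equiv track=rewrite | github.com/tariksalay/PythonProjects_2016 | Image Filters.py | vintage
-- ===== SOURCE A (Python) =====
-- def vintage(picture):
--     outp = []
--     for i in range(3):
--         outp.append(picture[i])
--
--     numpixels = int((len(picture) - 3) / 3)
--     for val in range(numpixels):
--         r = int(picture[ 3 + (3 * val)])
--         g = int(picture[ 3 + (3 * val) + 1])
--         b = int((picture[ 3 + (3 * val) + 2]) /2)
--         outp.append(r)
--         outp.append(g)
--         outp.append(b)
--     return outp
-- ===== SOURCE B (Python) =====
-- def vintage(picture):
--     n = (len(picture) - 3) // 3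
--     body = picture[3:3 + 3 * n]
--     outp = list(picture[:3])
--     for idx, v in enumerate(body):
--         outp.append(int(v / 2) if idx % 3 == 2 else int(v))
--     return outp
-- ===== Notes on version B (the rewrite author's own statement) =====
-- stated objective: alternative
-- what changed: replaces the per-pixel loop of three indexed lookups and three appends with one flat slice/enumerate pass that branches on index mod 3
import Mathlib
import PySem

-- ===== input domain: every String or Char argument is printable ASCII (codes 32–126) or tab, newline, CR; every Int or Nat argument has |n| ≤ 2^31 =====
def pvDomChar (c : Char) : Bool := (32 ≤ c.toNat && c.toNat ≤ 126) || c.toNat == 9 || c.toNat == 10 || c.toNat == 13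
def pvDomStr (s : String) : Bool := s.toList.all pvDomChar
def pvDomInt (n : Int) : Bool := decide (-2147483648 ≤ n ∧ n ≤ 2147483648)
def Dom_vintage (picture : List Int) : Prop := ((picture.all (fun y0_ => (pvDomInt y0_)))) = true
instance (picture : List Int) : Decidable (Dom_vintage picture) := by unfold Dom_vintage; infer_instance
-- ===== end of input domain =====

-- B replaces A's per-pixel loop of three indexed lookups/appends with one flat slice/enumerate pass branching on index mod 3 (alternative decomposition, same cost).

-- ===== PORT A =====
def vintage (picture : List Int) : List Int :=
  let outp := (PySem.List.pyRange 0 3 1).foldl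
    (fun acc i => acc ++ [PySem.List.pyGetD picture i 0]) []
  let numpixels := PySem.Int.truncdiv ((picture.length : Int) - 3) 3
  (PySem.List.pyRange 0 numpixels 1).foldl (fun acc v =>
    let r := PySem.List.pyGetD picture (3 + 3 * v) 0
    let g := PySem.List.pyGetD picture (3 + 3 * v + 1) 0
    let b := PySem.Int.truncdiv (PySem.List.pyGetD picture (3 + 3 * v + 2) 0) 2
    ((acc ++ [r]) ++ [g]) ++ [b]) outp

-- ===== PORT B =====
def vintage_alt (picture : List Int) : List Int :=
  let n := PySem.Int.floordiv ((picture.length : Int) - 3) 3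
  let body := PySem.List.slice picture (some 3) (some (3 + 3 * n))
  let outp := PySem.List.slice picture none (some 3)
  (PySem.List.enumerate body 0).foldl (fun acc p =>
    acc ++ [if PySem.Int.mod p.1 3 == 2 then PySem.Int.truncdiv p.2 2 else p.2]) outp

-- ===== PRECONDITION & SPEC =====
-- Pre_ excludes exactly the lists with fewer than 3 elements, on which A's header-copy loop raises IndexError.
def Pre_vintage (picture : List Int) : Prop := 3 ≤ picture.length
instance (picture : List Int) : Decidable (Pre_vintage picture) := by unfold Pre_vintage; infer_instance
def pvWitness_vintage : List Int := [10, 20, 30, 4, 5, 6]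

def Spec_vintage (picture : List Int) (out : List Int) : Prop := out = vintage_alt picture
instance (picture : List Int) (out : List Int) : Decidable (Spec_vintage picture out) := by unfold Spec_vintage; infer_instance

-- ===== CLAIM (what is proved, stated in full; the proofs are below) =====
def Claim_equal_vintage : Prop := ∀ (picture : List Int), Dom_vintage picture → Pre_vintage picture → Spec_vintage picture (vintage picture)

-- ===== LEMMAS AND PROOFS =====

-- A's interleaved triples over range(numpixels) equal B's index-parity pass over range(3*numpixels)
lemma key (f : Int → Int) (m : Nat) :
    (PySem.List.pyRange 0 (m : Int) 1).flatMap
        (fun v => [f (3 * v), f (3 * v + 1), PySem.Int.truncdiv (f (3 * v + 2)) 2])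
    = (PySem.List.pyRange 0 ((3 * m : Nat) : Int) 1).map
        (fun j => if PySem.Int.mod j 3 == 2 then PySem.Int.truncdiv (f j) 2 else f j) := by
  induction m with
  | zero => simp [PySem.List.pyRange_one_eq_nil]
  | succ m ih =>
    have h1 : ((m + 1 : Nat) : Int) = (m : Int) + 1 := by push_cast; ring
    have h2 : ((3 * (m + 1) : Nat) : Int) = ((3 * m : Nat) : Int) + 3 := by push_cast; ring
    rw [h1, PySem.List.pyRange_one_succ_right (by positivity)]
    rw [h2]
    have h3 : PySem.List.pyRange 0 (((3 * m : Nat) : Int) + 3) 1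
        = PySem.List.pyRange 0 ((3 * m : Nat) : Int) 1 ++ [((3*m:Nat):Int), ((3*m:Nat):Int)+1, ((3*m:Nat):Int)+2] := by
      rw [PySem.List.pyRange_one_append 0 ((3*m:Nat):Int) (((3*m:Nat):Int)+3) (by positivity) (by omega)]
      congr 1
      rw [show ((3*m:Nat):Int)+3 = (((3*m:Nat):Int)+2)+1 by ring, PySem.List.pyRange_one_succ_right (by omega),
          show ((3*m:Nat):Int)+2 = (((3*m:Nat):Int)+1)+1 by ring, PySem.List.pyRange_one_succ_right (by omega),
          PySem.List.pyRange_one_singleton]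
      simp
    rw [h3]
    simp only [List.flatMap_append, List.map_append, ih]
    congr 1
    simp


-- the two ports agree on any list with at least 3 elements
lemma vintage_eq_alt_cons3 (a b c : Int) (rest : List Int) :
    vintage (a :: b :: c :: rest) = vintage_alt (a :: b :: c :: rest) := by
  set m : Nat := rest.length / 3 with hm
  have hm3 : 3 * m ≤ rest.length := by omega
  have hlen : (((a :: b :: c :: rest).length : Int) - 3) = ((rest.length : Nat) : Int) := by
    simp; omega
  -- A side
  have hA : vintage (a :: b :: c :: rest) = [PySem.List.pyGetD (a :: b :: c :: rest) 0 0, PySem.List.pyGetD (a :: b :: c :: rest) 1 0, PySem.List.pyGetD (a :: b :: c :: rest) 2 0]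
      ++ (PySem.List.pyRange 0 ((3 * m : Nat) : Int) 1).map
        (fun j => if PySem.Int.mod j 3 == 2
          then PySem.Int.truncdiv (PySem.List.pyGetD (a :: b :: c :: rest) (3 + j) 0) 2
          else PySem.List.pyGetD (a :: b :: c :: rest) (3 + j) 0) := by
    have hnum : PySem.Int.truncdiv (((a :: b :: c :: rest).length : Int) - 3) 3 = (m : Int) := by
      rw [hlen]; simp [PySem.Int.truncdiv, hm]
    unfold vintage
    simp only [hnum]
    rw [show PySem.List.pyRange 0 3 1 = [0, 1, 2] from by decide]
    simp only [List.foldl]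
    have hfun : (fun (acc : List Int) (v : Int) =>
          ((acc ++ [PySem.List.pyGetD (a :: b :: c :: rest) (3 + 3 * v) 0]) ++ [PySem.List.pyGetD (a :: b :: c :: rest) (3 + 3 * v + 1) 0])
            ++ [PySem.Int.truncdiv (PySem.List.pyGetD (a :: b :: c :: rest) (3 + 3 * v + 2) 0) 2])
        = (fun (acc : List Int) (v : Int) => acc ++
            [PySem.List.pyGetD (a :: b :: c :: rest) (3 + 3 * v) 0, PySem.List.pyGetD (a :: b :: c :: rest) (3 + (3 * v + 1)) 0,
             PySem.Int.truncdiv (PySem.List.pyGetD (a :: b :: c :: rest) (3 + (3 * v + 2)) 0) 2]) := by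
      funext acc v
      rw [show (3:Int) + 3 * v + 1 = 3 + (3 * v + 1) by ring,
          show (3:Int) + 3 * v + 2 = 3 + (3 * v + 2) by ring]
      simp
    rw [hfun, PySem.List.foldl_append_eq_flatMap]
    have hk : (PySem.List.pyRange 0 (m : Int) 1).flatMap
        (fun v => [PySem.List.pyGetD (a :: b :: c :: rest) (3 + 3 * v) 0, PySem.List.pyGetD (a :: b :: c :: rest) (3 + (3 * v + 1)) 0,
          PySem.Int.truncdiv (PySem.List.pyGetD (a :: b :: c :: rest) (3 + (3 * v + 2)) 0) 2])
        = (PySem.List.pyRange 0 ((3 * m : Nat) : Int) 1).map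
          (fun j => if PySem.Int.mod j 3 == 2
            then PySem.Int.truncdiv (PySem.List.pyGetD (a :: b :: c :: rest) (3 + j) 0) 2
            else PySem.List.pyGetD (a :: b :: c :: rest) (3 + j) 0) :=
      key (fun j => PySem.List.pyGetD (a :: b :: c :: rest) (3 + j) 0) m
    rw [hk]
    simp
  -- B side
  have hB : vintage_alt (a :: b :: c :: rest) = [a, b, c]
      ++ (PySem.List.pyRange 0 ((3 * m : Nat) : Int) 1).map
        (fun j => if PySem.Int.mod j 3 == 2
          then PySem.Int.truncdiv (PySem.List.pyGetD (rest.take (3 * m)) j 0) 2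
          else PySem.List.pyGetD (rest.take (3 * m)) j 0) := by
    have hn : PySem.Int.floordiv (((a :: b :: c :: rest).length : Int) - 3) 3 = (m : Int) := by
      rw [hlen, hm]
      exact_mod_cast PySem.Int.floordiv_natCast rest.length 3
    have hbound : (3 : Int) + 3 * (m : Int) = ((3 + 3 * m : Nat) : Int) := by push_cast; ring
    have hbody : PySem.List.slice (a :: b :: c :: rest) (some 3) (some (3 + 3 * (m : Int))) = rest.take (3 * m) := by
      rw [hbound, show (3:Int) = ((3:Nat):Int) from rfl, PySem.List.slice_natCast]
      simp
    have houtp : PySem.List.slice (a :: b :: c :: rest) none (some 3) = [a, b, c] := by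
      rw [PySem.List.slice_to (a :: b :: c :: rest) (by norm_num)]
      rfl
    unfold vintage_alt
    simp only [hn, hbody, houtp]
    rw [PySem.List.foldl_append_singleton_eq_map, PySem.List.enumerate_eq_map_pyRange _ 0,
        List.map_map]
    have hlb : PySem.List.len (rest.take (3 * m)) = ((3 * m : Nat) : Int) := by
      simp [PySem.List.len, hm3]
    rw [hlb]
    rfl
  rw [hA, hB]
  congr 1
  · simp [pysem]
  · apply List.map_congr_left
    intro j hj
    rw [PySem.List.mem_pyRange_one] at hj
    obtain ⟨hj0, hj1⟩ := hj
    have hjlt : j < ((3 * m : Nat) : Int) := hj1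
    have hgd : PySem.List.pyGetD (a :: b :: c :: rest) (3 + j) 0 = PySem.List.pyGetD (rest.take (3 * m)) j 0 := by
      rw [PySem.List.pyGetD_eq_getElem (a :: b :: c :: rest) 0 (by omega) (by simp; omega),
          PySem.List.pyGetD_eq_getElem (rest.take (3 * m)) 0 hj0 (by simp; omega)]
      have h3j : (3 + j).toNat = j.toNat + 1 + 1 + 1 := by omega
      simp only [h3j, List.getElem_take, List.getElem_cons_succ]
    rw [hgd]

-- ===== VERDICT (by name: the statement is the Claim_ definition above) =====
theorem vintage_spec : Claim_equal_vintage := by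
  intro picture _ hpre
  unfold Spec_vintage
  match picture, hpre with
  | a :: b :: c :: rest, _ => exact vintage_eq_alt_cons3 a b c rest
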